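-- pv_equiv track=rewrite | github.com/cannellegrdt/Pharmalgo-projects | RealTimeEditor/server.py | panels_to_frame
-- ===== SOURCE A (Python) =====
-- PANEL_OFFSETS = {
--     "top": (0, 8),
--     "left": (8, 0),
--     "center": (8, 8),
--     "right": (8, 16),
--     "bottom": (16, 8),
-- }
--
-- def panels_to_frame(panels: dict) -> list:
--     """Convert 5 panel grids (each 8x8, values 0-7) to the 24x24 array expected by sim.py."""
--     frame = [[0] * 24 for _ in range(24)]
--     for panel_name, (row_off, col_off) in PANEL_OFFSETS.items():
--         panel = panels.get(panel_name, [])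
--         for row in range(8):
--             panel_row = panel[row] if row < len(panel) else []
--             for col in range(8):
--                 val = panel_row[col] if col < len(panel_row) else 0
--                 frame[row_off + row][col_off + col] = int(val)
--     return frame
-- ===== SOURCE B (Python) =====
-- PANEL_OFFSETS = {
--     "top": (0, 8),
--     "left": (8, 0),
--     "center": (8, 8),
--     "right": (8, 16),
--     "bottom": (16, 8),
-- }
--
-- def panels_to_frame(panels: dict) -> list:
--     """Convert 5 panel grids (each 8x8, values 0-7) to the 24x24 array expected by sim.py."""
--     def cell(r, c):
--         for name, (row_off, col_off) in PANEL_OFFSETS.items():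
--             if row_off <= r < row_off + 8 and col_off <= c < col_off + 8:
--                 panel = panels.get(name, [])
--                 lr, lc = r - row_off, c - col_off
--                 if lr < len(panel):
--                     prow = panel[lr]
--                     if lc < len(prow):
--                         return int(prow[lc])
--                 return 0
--         return 0
--     return [[cell(r, c) for c in range(24)] for r in range(24)]
-- ===== Notes on version B (the rewrite author's own statement) =====
-- stated objective: alternative
-- what changed: B is output-driven: it builds the 24x24 frame directly, computing each cell by locating the panel block that covers it in PANEL_OFFSETS, instead of A's input-driven in-place block writes into a preallocated mutable frame.
import Mathlib
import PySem

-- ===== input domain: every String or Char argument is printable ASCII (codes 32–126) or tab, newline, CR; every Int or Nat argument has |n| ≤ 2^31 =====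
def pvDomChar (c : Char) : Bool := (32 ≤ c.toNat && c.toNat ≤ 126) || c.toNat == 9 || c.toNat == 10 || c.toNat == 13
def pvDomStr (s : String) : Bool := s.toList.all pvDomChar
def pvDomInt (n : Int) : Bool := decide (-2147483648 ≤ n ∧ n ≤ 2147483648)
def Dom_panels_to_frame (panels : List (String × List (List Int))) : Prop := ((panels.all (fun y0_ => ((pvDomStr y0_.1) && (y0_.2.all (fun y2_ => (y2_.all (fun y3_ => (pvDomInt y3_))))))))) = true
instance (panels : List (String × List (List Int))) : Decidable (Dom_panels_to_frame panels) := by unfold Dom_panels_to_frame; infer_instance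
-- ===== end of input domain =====

-- B builds the 24x24 frame output-driven (one per-cell panel-block lookup) instead of A's
-- input-driven in-place block writes into a mutable frame; objective: alternative decomposition.

-- ===== PORT A =====
def pvPANEL_OFFSETS : List (String × (Int × Int)) :=
  [("top", (0, 8)), ("left", (8, 0)), ("center", (8, 8)), ("right", (8, 16)), ("bottom", (16, 8))]

-- A's two inner `for` loops: write one 8x8 panel block into `frame` at offset (ro, co)
def pvWritePanel (panel : List (List Int)) (ro co : Int) (frame : List (List Int)) : List (List Int) :=
  (PySem.List.pyRange 0 8 1).foldl (fun frame row =>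
    let panel_row : List Int := if row < (panel.length : Int) then PySem.List.pyGetD panel row [] else []
    (PySem.List.pyRange 0 8 1).foldl (fun frame col =>
      let val : Int := if col < (panel_row.length : Int) then PySem.List.pyGetD panel_row col 0 else 0
      PySem.List.pySetD frame (ro + row)
        (PySem.List.pySetD (PySem.List.pyGetD frame (ro + row) []) (co + col) val))
      frame)
    frame

def panels_to_frame (panels : List (String × List (List Int))) : List (List Int) :=
  let frame : List (List Int) := (List.range 24).map (fun _ => List.replicate 24 (0 : Int))
  pvPANEL_OFFSETS.foldl (fun frame nro =>
    pvWritePanel (PySem.Dict.getD (PySem.Dict.mk panels) nro.1 []) nro.2.1 nro.2.2 frame) frame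

-- ===== PORT B =====
-- Source B's inner `cell(r, c)`: walk PANEL_OFFSETS for the block containing (r, c).
def pvCellB (panels : List (String × List (List Int))) (r c : Int) :
    List (String × (Int × Int)) → Int
  | [] => 0
  | (name, (row_off, col_off)) :: rest =>
    if row_off ≤ r ∧ r < row_off + 8 ∧ col_off ≤ c ∧ c < col_off + 8 then
      let panel : List (List Int) := PySem.Dict.getD (PySem.Dict.mk panels) name []
      let lr : Int := r - row_off
      let lc : Int := c - col_off
      if lr < (panel.length : Int) then
        let prow : List Int := PySem.List.pyGetD panel lr []
        if lc < (prow.length : Int) then PySem.List.pyGetD prow lc 0 else 0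
      else 0
    else pvCellB panels r c rest

def panels_to_frame_alt (panels : List (String × List (List Int))) : List (List Int) :=
  (PySem.List.pyRange 0 24 1).map (fun r =>
    (PySem.List.pyRange 0 24 1).map (fun c => pvCellB panels r c pvPANEL_OFFSETS))

-- ===== PRECONDITION & SPEC =====
def Spec_panels_to_frame (panels : List (String × List (List Int))) (out : List (List Int)) : Prop := out = panels_to_frame_alt panels
instance (panels : List (String × List (List Int))) (out : List (List Int)) : Decidable (Spec_panels_to_frame panels out) := by unfold Spec_panels_to_frame; infer_instance

-- ===== CLAIM (what is proved, stated in full; the proofs are below) =====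
def Claim_equal_panels_to_frame : Prop := ∀ (panels : List (String × List (List Int))), Dom_panels_to_frame panels → Spec_panels_to_frame panels (panels_to_frame panels)

-- ===== LEMMAS AND PROOFS =====

-- A's per-cell value read off the block structure: same branch layout as pvCellB,
-- but with A's `panel_row`-first leaf expression.
def pvCellA (panels : List (String × List (List Int))) (r c : Int) :
    List (String × (Int × Int)) → Int
  | [] => 0
  | (name, (row_off, col_off)) :: rest =>
    if row_off ≤ r ∧ r < row_off + 8 ∧ col_off ≤ c ∧ c < col_off + 8 then
      let panel : List (List Int) := PySem.Dict.getD (PySem.Dict.mk panels) name []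
      let lr : Int := r - row_off
      let lc : Int := c - col_off
      let panel_row : List Int := if lr < (panel.length : Int) then PySem.List.pyGetD panel lr [] else []
      if lc < (panel_row.length : Int) then PySem.List.pyGetD panel_row lc 0 else 0
    else pvCellA panels r c rest

lemma pvCellA_eq_B (panels : List (String × List (List Int))) (r c : Int)
    (offs : List (String × (Int × Int))) :
    pvCellA panels r c offs = pvCellB panels r c offs := by
  induction offs with
  | nil => rfl
  | cons hd tl ih =>
    obtain ⟨name, row_off, col_off⟩ := hd
    by_cases h : row_off ≤ r ∧ r < row_off + 8 ∧ col_off ≤ c ∧ c < col_off + 8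
    · simp only [pvCellA, pvCellB, h]
      by_cases hlr : r - row_off < ((PySem.Dict.getD (PySem.Dict.mk panels) name []).length : Int)
      · simp [hlr]
      · simp [hlr]; omega
    · simp only [pvCellA, pvCellB, h, if_neg, not_false_iff]
      exact ih

-- `frame` as a tabulation of a cell function; A's writes become pointwise updates.
def pvTab (f : Int → Int → Int) : List (List Int) :=
  (PySem.List.pyRange 0 24 1).map (fun r => (PySem.List.pyRange 0 24 1).map (fun c => f r c))

lemma pvTab_length (f : Int → Int → Int) : (pvTab f).length = 24 := by
  simp [pvTab, PySem.List.length_pyRange_one]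

lemma pvTab_getElem (f : Int → Int → Int) (n : Nat) (h : n < (pvTab f).length) :
    (pvTab f)[n] = (PySem.List.pyRange 0 24 1).map (fun c => f n c) := by
  simp only [pvTab, List.getElem_map, PySem.List.getElem_pyRange_one]
  norm_num

lemma pvTab_row_length (f : Int → Int → Int) (n : Nat) (h : n < (pvTab f).length) :
    (pvTab f)[n].length = 24 := by
  rw [pvTab_getElem]; simp [PySem.List.length_pyRange_one]

lemma pvTab_getElem2 (f : Int → Int → Int) (n m : Nat) (h1 : n < (pvTab f).length)
    (h2 : m < (pvTab f)[n].length) :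
    (pvTab f)[n][m] = f n m := by
  simp only [pvTab_getElem, List.getElem_map, PySem.List.getElem_pyRange_one]
  norm_num

-- one `frame[i][j] = v` write on a tabulated frame
lemma pvSetCell (f : Int → Int → Int) (i j v : Int)
    (hi0 : 0 ≤ i) (hi1 : i < 24) (hj0 : 0 ≤ j) (hj1 : j < 24) :
    PySem.List.pySetD (pvTab f) i (PySem.List.pySetD (PySem.List.pyGetD (pvTab f) i []) j v)
    = pvTab (fun r c => if r = i ∧ c = j then v else f r c) := by
  have hlen : (pvTab f).length = 24 := pvTab_length f
  rw [PySem.List.pySetD_of_nonneg _ _ hi0, PySem.List.pySetD_of_nonneg _ _ hj0,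
      PySem.List.pyGetD_eq_getElem _ _ hi0 (by omega)]
  apply List.ext_getElem
  · simp [pvTab_length]
  · intro n h1 h2
    rw [List.getElem_set]
    by_cases hn : i.toNat = n
    · rw [if_pos hn]
      apply List.ext_getElem
      · rw [List.length_set, pvTab_row_length, pvTab_row_length]
      · intro m hm1 hm2
        rw [List.getElem_set, pvTab_getElem2]
        by_cases hm : j.toNat = m
        · rw [if_pos hm, pvTab_getElem2, if_pos (show ((n:Int) = i ∧ (m:Int) = j) by omega)]
        · rw [if_neg hm, pvTab_getElem2, if_neg (by omega), hn]
    · rw [if_neg hn]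
      apply List.ext_getElem
      · rw [pvTab_row_length, pvTab_row_length]
      · intro m hm1 hm2
        rw [pvTab_getElem2, pvTab_getElem2, if_neg (by omega)]

-- A's inner `for col in range(8)` loop (generalized over the written values g)
lemma pvFoldCols (g : Int → Int) (R co : Int) (hR0 : 0 ≤ R) (hR1 : R < 24)
    (hco0 : 0 ≤ co) (hco1 : co + 8 ≤ 24) (cols : List Int)
    (hcols : ∀ x ∈ cols, 0 ≤ x ∧ x < 8) (f : Int → Int → Int) :
    cols.foldl (fun frame col =>
      PySem.List.pySetD frame R
        (PySem.List.pySetD (PySem.List.pyGetD frame R []) (co + col) (g col))) (pvTab f)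
    = pvTab (fun r c => if r = R ∧ (c - co) ∈ cols then g (c - co) else f r c) := by
  induction cols generalizing f with
  | nil =>
    simp only [List.foldl_nil, List.not_mem_nil, and_false, if_false]
  | cons c0 rest ih =>
    rw [List.foldl_cons, pvSetCell f R (co + c0) (g c0) hR0 hR1
          (by have := hcols c0 (by simp); omega) (by have := hcols c0 (by simp); omega),
        ih (fun x hx => hcols x (by simp [hx]))]
    congr 1
    funext r c
    by_cases hr : r = R
    · by_cases h1 : (c - co) ∈ rest
      · rw [if_pos ⟨hr, h1⟩, if_pos ⟨hr, by simp [h1]⟩]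
      · by_cases h2 : c = co + c0
        · rw [if_neg (by tauto), if_pos ⟨hr, h2⟩,
              if_pos ⟨hr, by rw [show c - co = c0 by omega]; simp⟩,
              show c - co = c0 by omega]
        · rw [if_neg (by tauto), if_neg (by tauto),
              if_neg (by
                rintro ⟨-, hmem⟩
                rcases List.mem_cons.mp hmem with h | h
                · omega
                · exact h1 h)]
    · rw [if_neg (by tauto), if_neg (by tauto), if_neg (by tauto)]

-- A's `for row in range(8)` loop writing one panel block at offset (ro, co)
lemma pvFoldRows (panel : List (List Int)) (ro co : Int) (hro0 : 0 ≤ ro) (hro1 : ro + 8 ≤ 24)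
    (hco0 : 0 ≤ co) (hco1 : co + 8 ≤ 24) (rows : List Int)
    (hrows : ∀ x ∈ rows, 0 ≤ x ∧ x < 8) (f : Int → Int → Int) :
    rows.foldl (fun frame row =>
      (PySem.List.pyRange 0 8 1).foldl (fun frame col =>
        PySem.List.pySetD frame (ro + row)
          (PySem.List.pySetD (PySem.List.pyGetD frame (ro + row) []) (co + col)
            (if col < (((if row < (panel.length : Int) then PySem.List.pyGetD panel row [] else []) : List Int).length : Int) then
              PySem.List.pyGetD (if row < (panel.length : Int) then PySem.List.pyGetD panel row [] else []) col 0
            else 0))) frame) (pvTab f)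
    = pvTab (fun r c =>
        if (r - ro) ∈ rows ∧ 0 ≤ c - co ∧ c - co < 8 then
          (if (c - co) < (((if (r - ro) < (panel.length : Int) then PySem.List.pyGetD panel (r - ro) [] else []) : List Int).length : Int) then
            PySem.List.pyGetD (if (r - ro) < (panel.length : Int) then PySem.List.pyGetD panel (r - ro) [] else []) (c - co) 0
          else 0)
        else f r c) := by
  induction rows generalizing f with
  | nil => simp only [List.foldl_nil, List.not_mem_nil, false_and, if_false]
  | cons row rest ih =>
    rw [List.foldl_cons,
        pvFoldCols (fun col =>
            (if col < (((if row < (panel.length : Int) then PySem.List.pyGetD panel row [] else []) : List Int).length : Int) then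
              PySem.List.pyGetD (if row < (panel.length : Int) then PySem.List.pyGetD panel row [] else []) col 0
            else 0))
          (ro + row) co (by have := hrows row (by simp); omega)
          (by have := hrows row (by simp); omega) hco0 hco1 (PySem.List.pyRange 0 8 1)
          (fun x hx => PySem.List.mem_pyRange_one.mp hx) f,
        ih (fun x hx => hrows x (by simp [hx]))]
    congr 1
    funext r c
    by_cases hB : 0 ≤ c - co ∧ c - co < 8
    · by_cases h1 : (r - ro) ∈ rest
      · rw [if_pos ⟨h1, hB⟩,
            if_pos (show r - ro ∈ row :: rest ∧ 0 ≤ c - co ∧ c - co < 8 from ⟨by simp [h1], hB⟩)]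
      · by_cases h2 : r = ro + row
        · rw [if_neg (show ¬(r - ro ∈ rest ∧ 0 ≤ c - co ∧ c - co < 8) by tauto),
              if_pos ⟨h2, PySem.List.mem_pyRange_one.mpr hB⟩,
              show r - ro = row by omega,
              if_pos (show row ∈ row :: rest ∧ 0 ≤ c - co ∧ c - co < 8 from ⟨by simp, hB⟩)]
        · rw [if_neg (by tauto),
              if_neg (by rintro ⟨h2', -⟩; exact h2 (by omega)),
              if_neg (by
                rintro ⟨hmem, -⟩
                rcases List.mem_cons.mp hmem with h | h
                · exact h2 (by omega)
                · exact h1 h)]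
    · rw [if_neg (by tauto),
          if_neg (by rintro ⟨-, hmem⟩; exact hB (PySem.List.mem_pyRange_one.mp hmem)),
          if_neg (by tauto)]

-- one whole panel block write, with the region condition in pvCellB's shape
lemma pvBlock (panel : List (List Int)) (ro co : Int) (hro0 : 0 ≤ ro) (hro1 : ro + 8 ≤ 24)
    (hco0 : 0 ≤ co) (hco1 : co + 8 ≤ 24) (f : Int → Int → Int) :
    pvWritePanel panel ro co (pvTab f)
    = pvTab (fun r c =>
        if ro ≤ r ∧ r < ro + 8 ∧ co ≤ c ∧ c < co + 8 then
          (if (c - co) < (((if (r - ro) < (panel.length : Int) then PySem.List.pyGetD panel (r - ro) [] else []) : List Int).length : Int) then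
            PySem.List.pyGetD (if (r - ro) < (panel.length : Int) then PySem.List.pyGetD panel (r - ro) [] else []) (c - co) 0
          else 0)
        else f r c) := by
  unfold pvWritePanel
  rw [pvFoldRows panel ro co hro0 hro1 hco0 hco1 (PySem.List.pyRange 0 8 1)
        (fun x hx => PySem.List.mem_pyRange_one.mp hx) f]
  congr 1
  funext r c
  by_cases h : ro ≤ r ∧ r < ro + 8 ∧ co ≤ c ∧ c < co + 8
  · rw [if_pos h, if_pos ⟨PySem.List.mem_pyRange_one.mpr (by omega), by omega, by omega⟩]
  · rw [if_neg h, if_neg (by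
      rintro ⟨hmem, h1, h2⟩
      have := PySem.List.mem_pyRange_one.mp hmem
      exact h (by omega))]

-- A as a chain of the five block writes on the zero frame
lemma pvA_chain (panels : List (String × List (List Int))) : panels_to_frame panels
    = pvWritePanel (PySem.Dict.getD (PySem.Dict.mk panels) "bottom" []) 16 8
        (pvWritePanel (PySem.Dict.getD (PySem.Dict.mk panels) "right" []) 8 16
          (pvWritePanel (PySem.Dict.getD (PySem.Dict.mk panels) "center" []) 8 8
            (pvWritePanel (PySem.Dict.getD (PySem.Dict.mk panels) "left" []) 8 0
              (pvWritePanel (PySem.Dict.getD (PySem.Dict.mk panels) "top" []) 0 8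
                (pvTab (fun _ _ => 0)))))) := by
  unfold panels_to_frame pvPANEL_OFFSETS
  rw [List.foldl_cons, List.foldl_cons, List.foldl_cons, List.foldl_cons, List.foldl_cons,
      List.foldl_nil]
  rfl

-- ===== VERDICT (by name: the statement is the Claim_ definition above) =====
set_option maxRecDepth 200000 in
set_option maxHeartbeats 2000000 in
theorem panels_to_frame_spec : Claim_equal_panels_to_frame := by
  intro panels _
  unfold Spec_panels_to_frame
  show panels_to_frame panels = panels_to_frame_alt panels
  have halt : panels_to_frame_alt panels
      = pvTab (fun r c => pvCellA panels r c pvPANEL_OFFSETS) := by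
    unfold panels_to_frame_alt pvTab
    simp only [pvCellA_eq_B]
  rw [halt, pvA_chain,
      pvBlock _ _ _ (by norm_num) (by norm_num) (by norm_num) (by norm_num) _,
      pvBlock _ _ _ (by norm_num) (by norm_num) (by norm_num) (by norm_num) _,
      pvBlock _ _ _ (by norm_num) (by norm_num) (by norm_num) (by norm_num) _,
      pvBlock _ _ _ (by norm_num) (by norm_num) (by norm_num) (by norm_num) _,
      pvBlock _ _ _ (by norm_num) (by norm_num) (by norm_num) (by norm_num) _]
  congr 1
  funext r c
  simp only [pvCellA, pvPANEL_OFFSETS]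
  split_ifs <;> first | rfl | omega
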